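-- pv_equiv track=rewrite | github.com/milesfoot/comp110-22f-workspace | exercises/ex04_utils.py | all
-- ===== SOURCE A (Python) =====
-- def all(int_list: list[int], single: int) -> bool:
--     """Determining whether a list constains only one integer."""
--     if len(int_list) == 0:
--         return False
--     i: int = 0
--     while i < len(int_list):
--         if single == int_list[i]:
--             i += 1
--         else:
--             return False
--     return True
-- ===== SOURCE B (Python) =====
-- def all(int_list: list[int], single: int) -> bool:
--     """Determining whether a list constains only one integer."""
--     return len(int_list) > 0 and set(int_list) == {single}
-- ===== Notes on version B (the rewrite author's own statement) =====
-- stated objective: idiomatic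
-- what changed: Replaced the indexed while-loop with early exit by a one-pass distinct-value set build compared wholesale against the singleton {single} (plus an explicit non-empty guard).
import Mathlib
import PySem

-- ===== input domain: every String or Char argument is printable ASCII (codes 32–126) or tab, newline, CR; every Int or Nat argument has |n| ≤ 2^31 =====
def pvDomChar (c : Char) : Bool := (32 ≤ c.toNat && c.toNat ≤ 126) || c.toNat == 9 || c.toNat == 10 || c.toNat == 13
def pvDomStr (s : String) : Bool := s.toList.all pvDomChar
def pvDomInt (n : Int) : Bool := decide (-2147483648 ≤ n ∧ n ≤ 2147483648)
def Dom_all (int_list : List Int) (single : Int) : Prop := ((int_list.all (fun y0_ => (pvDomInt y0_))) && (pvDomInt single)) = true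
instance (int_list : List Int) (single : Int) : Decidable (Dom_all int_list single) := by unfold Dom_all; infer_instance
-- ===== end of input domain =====

-- B replaces A's indexed while-loop-with-early-exit by building the distinct-value set once and comparing it to {single} (idiomatic; same cost).


-- ===== PORT A =====
-- the while loop 'i < len; if single == l[i] then i += 1 else return False'
def allLoop (int_list : List Int) (single : Int) (i : Nat) : Bool :=
  if h : i < int_list.length then
    if single == int_list[i] then allLoop int_list single (i + 1) else false
  else true
termination_by int_list.length - i

def all (int_list : List Int) (single : Int) : Bool :=
  if int_list.length == 0 then false
  else allLoop int_list single 0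

-- ===== PORT B =====
def all_alt (int_list : List Int) (single : Int) : Bool :=
  decide (0 < int_list.length) && PySem.Set.equal (PySem.Set.ofList int_list) (PySem.Set.ofList [single])

-- ===== PRECONDITION & SPEC =====
def Spec_all (int_list : List Int) (single : Int) (out : Bool) : Prop := out = all_alt int_list single
instance (int_list : List Int) (single : Int) (out : Bool) : Decidable (Spec_all int_list single out) := by unfold Spec_all; infer_instance

-- ===== CLAIM (what is proved, stated in full; the proofs are below) =====
def Claim_equal_all : Prop := ∀ (int_list : List Int) (single : Int), Dom_all int_list single → Spec_all int_list single (all int_list single)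

-- ===== LEMMAS AND PROOFS =====

-- A's loop from position i checks that every element of the suffix equals single
theorem allLoop_eq (int_list : List Int) (single : Int) :
    ∀ i, allLoop int_list single i = (int_list.drop i).all (fun x => single == x) := by
  intro i
  induction h : int_list.length - i using Nat.strong_induction_on generalizing i with
  | _ n ih =>
    unfold allLoop
    by_cases hi : i < int_list.length
    · rw [List.drop_eq_getElem_cons hi]
      simp only [hi, dif_pos, List.all_cons]
      by_cases he : single == int_list[i]
      · rw [he, ih (int_list.length - (i+1)) (by omega) (i+1) rfl]; simp
      · simp [he]
    · have hd : List.drop i int_list = [] := List.drop_eq_nil_of_le (by omega)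
      simp [hi, hd]

theorem all_eq_alt (int_list : List Int) (single : Int) :
    all int_list single = all_alt int_list single := by
  unfold all all_alt
  by_cases hnil : int_list.length = 0
  · simp [hnil]
  · rw [if_neg (by simp [hnil])]
    simp only [allLoop_eq, List.drop_zero]
    have hlen : (0 < int_list.length) := Nat.pos_of_ne_zero hnil
    simp only [decide_eq_true hlen, Bool.true_and]
    rcases Bool.eq_false_or_eq_true (PySem.Set.equal (PySem.Set.ofList int_list) (PySem.Set.ofList [single])) with h | h
    swap
    · rw [h]
      rw [Bool.eq_false_iff] at h
      rw [Bool.eq_false_iff]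
      intro hall
      rw [List.all_eq_true] at hall
      apply h
      rw [PySem.Set.equal_iff]
      intro x
      simp only [PySem.Set.mem_ofList, List.mem_singleton]
      constructor
      · intro hx; exact (beq_iff_eq.mp (hall x hx)).symm
      · rintro rfl
        rcases List.exists_mem_of_length_pos hlen with ⟨y, hy⟩
        rw [beq_iff_eq.mp (hall y hy)]
        exact hy
    · rw [h]
      rw [PySem.Set.equal_iff] at h
      rw [List.all_eq_true]
      intro x hx
      have := (h x).mp (by rwa [PySem.Set.mem_ofList])
      simp only [PySem.Set.mem_ofList, List.mem_singleton] at this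
      simp [this]

-- ===== VERDICT (by name: the statement is the Claim_ definition above) =====
theorem all_spec : Claim_equal_all := by
  intro int_list single _
  unfold Spec_all
  exact all_eq_alt int_list single
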